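-- pv_equiv track=rewrite | github.com/aecon/AggreQuant_v2.0 | nuclei_segmentation/plot_results.py | _interleaved_indices
-- ===== SOURCE A (Python) =====
-- def _interleaved_indices(n):
--     """Return indices 0..n-1 reordered so adjacent entries are far apart.
--
--     Alternates picking from the low and high ends:
--     0, n-1, 1, n-2, 2, n-3, ...
--     """
--     order = []
--     lo, hi = 0, n - 1
--     while lo <= hi:
--         order.append(lo)
--         if lo != hi:
--             order.append(hi)
--         lo += 1
--         hi -= 1
--     return order
-- ===== SOURCE B (Python) =====
-- def _interleaved_indices(n):
--     """Return indices 0..n-1 reordered so adjacent entries are far apart.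
--
--     Closed-form: output position i holds i//2 for even i and n-1-i//2 for odd i.
--     """
--     return [i // 2 if i % 2 == 0 else n - 1 - i // 2 for i in range(n)]
-- ===== Notes on version B (the rewrite author's own statement) =====
-- stated objective: simpler
-- what changed: Replaces the two-pointer while loop with mutable lo/hi state by a single closed-form comprehension over range(n) (i//2 at even positions, n-1-i//2 at odd positions).
import Mathlib
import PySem

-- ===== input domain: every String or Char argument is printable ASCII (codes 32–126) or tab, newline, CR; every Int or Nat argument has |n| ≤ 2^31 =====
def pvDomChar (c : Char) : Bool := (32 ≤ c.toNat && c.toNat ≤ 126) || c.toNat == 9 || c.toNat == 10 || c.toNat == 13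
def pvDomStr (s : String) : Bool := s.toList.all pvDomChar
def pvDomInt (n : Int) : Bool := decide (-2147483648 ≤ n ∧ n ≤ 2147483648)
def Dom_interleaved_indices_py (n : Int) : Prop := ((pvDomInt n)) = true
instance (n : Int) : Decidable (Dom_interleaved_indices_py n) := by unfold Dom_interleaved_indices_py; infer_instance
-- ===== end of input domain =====

-- B replaces A's two-pointer sweep by a closed-form index comprehension; objective: simpler.

-- ===== PORT A =====
-- while lo <= hi: append lo; if lo != hi: append hi; lo += 1; hi -= 1
def interleavedLoop (order : List Int) (lo hi : Int) : List Int :=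
  if lo ≤ hi then
    interleavedLoop (order ++ (if lo ≠ hi then [lo, hi] else [lo])) (lo + 1) (hi - 1)
  else order
termination_by (hi + 1 - lo).toNat
decreasing_by omega

def interleaved_indices_py (n : Int) : List Int :=
  interleavedLoop [] 0 (n - 1)

-- ===== PORT B =====
def interleaved_indices_py_alt (n : Int) : List Int :=
  (PySem.List.pyRange 0 n 1).map
    (fun i => if PySem.Int.mod i 2 = 0 then PySem.Int.floordiv i 2
              else n - 1 - PySem.Int.floordiv i 2)

-- ===== PRECONDITION & SPEC =====
def Spec_interleaved_indices_py (n : Int) (out : List Int) : Prop := out = interleaved_indices_py_alt n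
instance (n : Int) (out : List Int) : Decidable (Spec_interleaved_indices_py n out) := by unfold Spec_interleaved_indices_py; infer_instance

-- ===== CLAIM (what is proved, stated in full; the proofs are below) =====
def Claim_equal_interleaved_indices_py : Prop := ∀ (n : Int), Dom_interleaved_indices_py n → Spec_interleaved_indices_py n (interleaved_indices_py n)

-- ===== LEMMAS AND PROOFS =====

-- The loop from state (lo, hi) emits, for output position j, lo + j/2 at even j and hi - j/2 at odd j.
theorem interleavedLoop_eq (k : Nat) : ∀ (lo hi : Int) (order : List Int),
    hi + 1 - lo = (k : Int) →
    interleavedLoop order lo hi =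
      order ++ (List.range k).map
        (fun j => if j % 2 = 0 then lo + (j / 2 : Nat) else hi - (j / 2 : Nat)) := by
  induction k using Nat.strong_induction_on with
  | _ k ih =>
    intro lo hi order hk
    match k with
    | 0 =>
      rw [interleavedLoop]
      simp only [Nat.cast_zero] at hk
      have : ¬ lo ≤ hi := by omega
      simp [this]
    | 1 =>
      have hlohi : lo = hi := by simp only [Nat.cast_one] at hk; omega
      rw [interleavedLoop]
      rw [interleavedLoop]
      simp [hlohi, List.range_succ]

    | (m + 2) =>
      have hlt : lo < hi := by push_cast at hk; omega
      rw [interleavedLoop]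
      have hne : lo ≠ hi := by omega
      simp only [hlt.le, if_pos]
      rw [ih m (by omega) (lo + 1) (hi - 1) _ (by push_cast at hk ⊢; omega)]
      rw [List.append_assoc]
      congr 1
      -- range (m+2) = 0 :: 1 :: shifted range m
      rw [show m + 2 = m + 1 + 1 from rfl, List.range_succ_eq_map, List.range_succ_eq_map]
      simp only [List.map_cons, List.map_map, Function.comp_def, Nat.succ_eq_add_one]
      have : ∀ j : Nat, (if (j + 1 + 1) % 2 = 0 then lo + ((j + 1 + 1) / 2 : Nat) else hi - ((j + 1 + 1) / 2 : Nat))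
          = (if j % 2 = 0 then lo + 1 + (j / 2 : Nat) else hi - 1 - (j / 2 : Nat)) := by
        intro j
        have h2 : (j + 1 + 1) % 2 = j % 2 := by omega
        have h3 : (j + 1 + 1) / 2 = j / 2 + 1 := by omega
        rw [h2, h3]
        split <;> push_cast <;> ring
      simp only [this]
      simp [hne]

-- ===== VERDICT (by name: the statement is the Claim_ definition above) =====
theorem interleaved_indices_py_spec : Claim_equal_interleaved_indices_py := by
  unfold Claim_equal_interleaved_indices_py
  intro n _
  unfold Spec_interleaved_indices_py interleaved_indices_py interleaved_indices_py_alt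
  by_cases hn : 0 ≤ n
  case neg =>
    rw [interleavedLoop, if_neg (by omega : ¬ ((0:Int) ≤ n - 1))]
    rw [PySem.List.pyRange_one_eq_nil (by omega : n ≤ 0)]
    simp
  rw [interleavedLoop_eq n.toNat 0 (n - 1) [] (by omega), PySem.List.pyRange_one]
  simp only [List.nil_append, List.map_map, Int.sub_zero]
  apply List.map_congr_left
  intro j hj
  simp only [Function.comp, Int.zero_add]
  have hmod : PySem.Int.mod (j : Int) 2 = ((j % 2 : Nat) : Int) := PySem.Int.mod_natCast j 2
  have hdiv : PySem.Int.floordiv (j : Int) 2 = ((j / 2 : Nat) : Int) := PySem.Int.floordiv_natCast j 2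
  rw [hmod, hdiv]
  by_cases h : j % 2 = 0 <;> simp [h] <;> omega
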